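-- pv_equiv track=rewrite | github.com/ianbakst/dna-tags | dna_tags/encoder.py | get_from_list
-- ===== SOURCE A (Python) =====
-- from math import ceil
--
-- def get_from_list(tag_list: list, order: int = 0) -> list:
--     if order == 0:
--         return tag_list
--     new_list = []
--     s = ceil(len(tag_list) / (2**order))
--     for i in range((2**order)):
--         if i % 2 == 1:
--             new_list.extend(tag_list[s * i : s * (i + 1)])
--     return new_list
-- ===== SOURCE B (Python) =====
-- from math import ceil
--
-- def get_from_list(tag_list: list, order: int = 0) -> list:
--     if order == 0:
--         return tag_list
--     s = ceil(len(tag_list) / (2**order))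
--     if s == 0:
--         return []
--     return [x for i, x in enumerate(tag_list) if (i // s) % 2 == 1]
-- ===== Notes on version B (the rewrite author's own statement) =====
-- stated objective: simpler
-- what changed: Replaces the loop over all 2^order chunk indices with slicing by a single pass over the elements that keeps x at position i exactly when its chunk index i//s is odd.
import Mathlib
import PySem

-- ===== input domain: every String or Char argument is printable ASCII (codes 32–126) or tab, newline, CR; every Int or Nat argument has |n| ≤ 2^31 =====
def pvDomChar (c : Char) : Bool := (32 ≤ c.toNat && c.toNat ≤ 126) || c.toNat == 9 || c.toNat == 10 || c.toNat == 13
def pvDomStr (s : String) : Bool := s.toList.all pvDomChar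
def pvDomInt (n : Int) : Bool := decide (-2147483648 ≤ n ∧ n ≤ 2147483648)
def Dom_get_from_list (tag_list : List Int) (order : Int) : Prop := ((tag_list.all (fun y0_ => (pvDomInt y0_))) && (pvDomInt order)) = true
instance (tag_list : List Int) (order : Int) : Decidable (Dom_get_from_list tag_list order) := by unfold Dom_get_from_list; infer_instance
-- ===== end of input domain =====

-- B replaces A's loop over all 2^order chunk indices with a single pass over the elements,
-- keeping the element at position i exactly when its chunk index i // s is odd (simpler).

-- Both Pythons compute s with the same expression `ceil(len(tag_list) / (2**order))`;
-- this helper models that CPython computation (int/int true division is IEEE double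
-- division). It is exact for 0 ≤ n < 2^53: for k ≤ 1074 the quotient n/2^k is an exact
-- double (power-of-two divisor, mantissa fits), so ceil is the integer ceiling; for
-- k ≥ 1075 the quotient rounds half-to-even to a multiple of 2^-1074, whose ceiling is
-- nonzero (and then equals the integer ceiling, which is 1) exactly when 2*n > 2^(k-1074),
-- which for n < 2^53 is impossible once k > 1127.
def pyCeilDiv (n : Int) (k : Nat) : Int :=
  if k ≤ 1074 then -(PySem.Int.floordiv (-n) (2 ^ k))
  else if k ≤ 1127 ∧ 2 * n > 2 ^ (k - 1074) then -(PySem.Int.floordiv (-n) (2 ^ k))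
  else 0

-- ===== PORT A =====
def get_from_list (tag_list : List Int) (order : Int) : List Int :=
  if order = 0 then tag_list
  else
    let s : Int := pyCeilDiv (tag_list.length : Int) order.toNat
    (PySem.List.pyRange 0 (2 ^ order.toNat) 1).foldl
      (fun acc i =>
        if PySem.Int.mod i 2 = 1 then
          acc ++ PySem.List.slice tag_list (some (s * i)) (some (s * (i + 1)))
        else acc) []

-- ===== PORT B =====
def get_from_list_alt (tag_list : List Int) (order : Int) : List Int :=
  if order = 0 then tag_list
  else
    let s : Int := pyCeilDiv (tag_list.length : Int) order.toNat
    if s = 0 then []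
    else
      ((PySem.List.enumerate tag_list 0).filter
          (fun p => PySem.Int.mod (PySem.Int.floordiv p.1 s) 2 = 1)).map (·.2)

-- ===== PRECONDITION & SPEC =====
-- Pre_ excludes only order < 0, where A raises TypeError (range() applied to the float 2**order).
def Pre_get_from_list (tag_list : List Int) (order : Int) : Prop := 0 ≤ order
instance (tag_list : List Int) (order : Int) : Decidable (Pre_get_from_list tag_list order) := by unfold Pre_get_from_list; infer_instance
def pvWitness_get_from_list : List Int × Int := ([1, 2, 3, 4, 5], 1)

def Spec_get_from_list (tag_list : List Int) (order : Int) (out : List Int) : Prop := out = get_from_list_alt tag_list order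
instance (tag_list : List Int) (order : Int) (out : List Int) : Decidable (Spec_get_from_list tag_list order out) := by unfold Spec_get_from_list; infer_instance

-- ===== CLAIM =====
def Claim_equal_get_from_list : Prop := ∀ (tag_list : List Int) (order : Int), Dom_get_from_list tag_list order → Pre_get_from_list tag_list order → Spec_get_from_list tag_list order (get_from_list tag_list order)

-- ===== LEMMAS AND PROOFS =====

-- a block of consecutive indices on which the filter predicate is constantly false
lemma filter_enumerate_none (f : Int × Int → Bool) :
    ∀ (ys : List Int) (a : Int),
      (∀ j : Nat, (h : j < ys.length) → f (a + j, ys[j]) = false) →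
      (PySem.List.enumerate ys a).filter f = [] := by
  intro ys
  induction ys with
  | nil => intro a _; simp [PySem.List.enumerate_nil]
  | cons x xs ih =>
      intro a h
      rw [PySem.List.enumerate_cons, List.filter_cons]
      have h0 := h 0 (by simp)
      simp only [Int.natCast_zero, add_zero] at h0
      simp only [List.getElem_cons_zero] at h0
      rw [h0]
      apply ih
      intro j hj
      have := h (j + 1) (by simpa using Nat.succ_lt_succ hj)
      simpa [add_assoc, add_comm, add_left_comm, List.getElem_cons_succ] using this
  
-- a block of consecutive indices on which the filter predicate is constantly true
lemma filter_enumerate_all (f : Int × Int → Bool) :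
    ∀ (ys : List Int) (a : Int),
      (∀ j : Nat, (h : j < ys.length) → f (a + j, ys[j]) = true) →
      (PySem.List.enumerate ys a).filter f = PySem.List.enumerate ys a := by
  intro ys
  induction ys with
  | nil => intro a _; simp [PySem.List.enumerate_nil]
  | cons x xs ih =>
      intro a h
      rw [PySem.List.enumerate_cons, List.filter_cons]
      have h0 := h 0 (by simp)
      simp only [Int.natCast_zero, add_zero] at h0
      simp only [List.getElem_cons_zero] at h0
      rw [h0]
      simp only [ite_true]
      congr 1
      apply ih
      intro j hj
      have := h (j + 1) (by simpa using Nat.succ_lt_succ hj)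
      simpa [add_assoc, add_comm, add_left_comm, List.getElem_cons_succ] using this

-- odd indices of range (2*K) enumerated directly
lemma flatMap_range_odd (K : Nat) (f : Nat → List Int) :
    (List.range (2 * K)).flatMap (fun j => if j % 2 = 1 then f j else []) =
      (List.range K).flatMap (fun t => f (2 * t + 1)) := by
  induction K with
  | zero => simp
  | succ K ih =>
      have h2 : 2 * (K + 1) = (2 * K) + 1 + 1 := by omega
      rw [h2, List.range_succ, List.range_succ, List.flatMap_append, List.flatMap_append, ih,
          List.range_succ, List.flatMap_append]
      simp [Nat.mul_mod_right]

-- B's element filter as the flatMap of the odd chunks (σ = chunk size, K pairs of chunks)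
lemma filter_enum_chunks (σ : Nat) (hσ : 0 < σ) (K : Nat) :
    ∀ (xs : List Int) (m : Nat), xs.length ≤ 2 * σ * K →
      ((PySem.List.enumerate xs ((2 * σ * m : Nat) : Int)).filter
          (fun p => PySem.Int.mod (PySem.Int.floordiv p.1 (σ : Int)) 2 = 1)).map (·.2)
        = (List.range K).flatMap (fun t => (xs.drop (σ * (2 * t + 1))).take σ) := by
  induction K with
  | zero =>
      intro xs m hlen
      have : xs = [] := by
        cases xs with
        | nil => rfl
        | cons a l => simp at hlen
      subst this
      simp [PySem.List.enumerate_nil]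
  | succ K ih =>
      intro xs m hlen
      -- split xs into the even chunk, the odd chunk, and the rest
      have hsplit : xs = xs.take σ ++ ((xs.drop σ).take σ ++ (xs.drop σ).drop σ) := by
        rw [List.take_append_drop, List.take_append_drop]
      conv_lhs => rw [hsplit]
      rw [PySem.List.enumerate_append, PySem.List.enumerate_append,
          List.filter_append, List.filter_append, List.map_append, List.map_append]
      -- even chunk: indices in [2σm, 2σm + σ), chunk index 2m even, all filtered out
      have hblock1 :
          ((PySem.List.enumerate (xs.take σ) ((2 * σ * m : Nat) : Int)).filter
            (fun p => PySem.Int.mod (PySem.Int.floordiv p.1 (σ : Int)) 2 = 1)) = [] := by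
        apply filter_enumerate_none
        intro j hj
        have hjσ : j < σ := lt_of_lt_of_le hj (by simpa using List.length_take_le σ xs)
        have hidx : ((2 * σ * m : Nat) : Int) + (j : Nat) = ((2 * σ * m + j : Nat) : Int) := by
          push_cast; ring
        rw [hidx, PySem.Int.floordiv_natCast]
        have hdiv : (2 * σ * m + j) / σ = 2 * m := by
          have h2 : 2 * σ * m = σ * (2 * m) := by ring
          rw [h2, Nat.mul_add_div hσ, Nat.div_eq_of_lt hjσ, Nat.add_zero]
        rw [hdiv]
        have hm2 : PySem.Int.mod ((2 * m : Nat) : Int) 2 = ((2 * m % 2 : Nat) : Int) := by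
          exact_mod_cast PySem.Int.mod_natCast (2 * m) 2
        simp
      -- odd chunk: indices in [2σm + σ, 2σm + 2σ), chunk index 2m+1 odd, all kept
      have hblock2 :
          ((PySem.List.enumerate ((xs.drop σ).take σ)
              (((2 * σ * m : Nat) : Int) + ((xs.take σ).length : Nat))).filter
            (fun p => PySem.Int.mod (PySem.Int.floordiv p.1 (σ : Int)) 2 = 1))
          = PySem.List.enumerate ((xs.drop σ).take σ)
              (((2 * σ * m : Nat) : Int) + ((xs.take σ).length : Nat)) := by
        by_cases hshort : xs.length ≤ σ
        · have hd : xs.drop σ = [] := List.drop_eq_nil_iff.mpr hshort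
          rw [hd]
          simp [PySem.List.enumerate_nil]
        · push_neg at hshort
          have hlen1 : (xs.take σ).length = σ := by
            simp [Nat.le_of_lt hshort]
          apply filter_enumerate_all
          intro j hj
          have hjσ : j < σ := lt_of_lt_of_le hj (by simpa using List.length_take_le σ (xs.drop σ))
          have hidx : ((2 * σ * m : Nat) : Int) + ((xs.take σ).length : Nat) + (j : Nat)
              = ((σ * (2 * m + 1) + j : Nat) : Int) := by
            rw [hlen1]; push_cast; ring
          rw [hidx, PySem.Int.floordiv_natCast]
          have hdiv : (σ * (2 * m + 1) + j) / σ = 2 * m + 1 := by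
            rw [Nat.mul_add_div hσ, Nat.div_eq_of_lt hjσ, Nat.add_zero]
          rw [hdiv]
          have hm2 : PySem.Int.mod ((2 * m + 1 : Nat) : Int) 2 = (((2 * m + 1) % 2 : Nat) : Int) := by
            exact_mod_cast PySem.Int.mod_natCast (2 * m + 1) 2
          simp
      rw [hblock1, hblock2, PySem.List.map_snd_enumerate, List.map_nil, List.nil_append]
      -- RHS: peel off t = 0 (the first odd chunk)
      rw [List.range_succ_eq_map, List.flatMap_cons, List.flatMap_map]
      congr 1
      · congr 1
        have : σ * (2 * 0 + 1) = σ := by ring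
        rw [this]
      -- the rest of the list against the remaining chunks
      · by_cases h2 : xs.length ≤ 2 * σ
        · have hd : (xs.drop σ).drop σ = [] := by
            rw [List.drop_drop]
            exact List.drop_eq_nil_iff.mpr (by omega)
          rw [hd]
          simp only [PySem.List.enumerate_nil, List.filter_nil, List.map_nil]
          symm
          apply List.flatMap_eq_nil_iff.mpr
          intro t _
          have hdrop : xs.drop (σ * (2 * (t + 1) + 1)) = [] := by
            apply List.drop_eq_nil_iff.mpr
            have : 2 * σ ≤ σ * (2 * (t + 1) + 1) := by nlinarith
            omega
          rw [hdrop, List.take_nil]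
        · push_neg at h2
          have hlen1 : (xs.take σ).length = σ := by
            simp; omega
          have hlen2 : ((xs.drop σ).take σ).length = σ := by
            simp only [List.length_take, List.length_drop]
            omega
          have hstart : (((2 * σ * m : Nat) : Int) + ((xs.take σ).length : Nat))
              + (((xs.drop σ).take σ).length : Nat) = ((2 * σ * (m + 1) : Nat) : Int) := by
            rw [hlen1, hlen2]; push_cast; ring
          rw [hstart, ih ((xs.drop σ).drop σ) (m + 1)
                (by
                  simp only [List.length_drop]
                  have hh : 2 * σ * (K + 1) = 2 * σ * K + 2 * σ := by ring
                  omega)]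
          apply List.flatMap_congr
          intro t _
          rw [List.drop_drop, List.drop_drop]
          simp only [Nat.succ_eq_add_one]
          congr 2
          ring

-- main computation for order > 0
lemma main_eq (tag_list : List Int) (order : Int) (h0 : 0 ≤ order) (hne : order ≠ 0) :
    get_from_list tag_list order = get_from_list_alt tag_list order := by
  simp only [get_from_list, get_from_list_alt, if_neg hne]
  set m : Nat := order.toNat with hm
  have hm1 : 1 ≤ m := by omega
  set n : Nat := tag_list.length with hn
  set s : Int := pyCeilDiv (n : Int) m with hsdef
  have hk : (0:Int) < 2 ^ m := by positivity
  have halt : s = 0 ∨ s = -(PySem.Int.floordiv (-(n : Int)) (2 ^ m)) := by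
    rw [hsdef]
    unfold pyCeilDiv
    split_ifs <;> simp
  by_cases hs : s = 0
  · -- s = 0: every slice is tag_list[0:0] = [], so A's fold returns [] as well
    rw [hs, if_pos rfl]
    have hone : ∀ (acc : List Int) (i : Int),
        (if PySem.Int.mod i 2 = 1 then
            acc ++ PySem.List.slice tag_list (some ((0:Int) * i)) (some ((0:Int) * (i + 1)))
          else acc) = acc := by
      intro acc i
      have hsl : PySem.List.slice tag_list (some ((0:Int) * i)) (some ((0:Int) * (i + 1))) = [] := by
        rw [zero_mul, zero_mul]
        simp [PySem.List.slice]
      rw [hsl]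
      split <;> simp
    have hfold : ∀ (l acc : List Int),
        l.foldl (fun acc i =>
          if PySem.Int.mod i 2 = 1 then
            acc ++ PySem.List.slice tag_list (some ((0:Int) * i)) (some ((0:Int) * (i + 1)))
          else acc) acc = acc := by
      intro l
      induction l with
      | nil => intro acc; rfl
      | cons x xs ih => intro acc; rw [List.foldl_cons, hone]; exact ih acc
    exact hfold _ []
  · rcases halt with h | hceil
    · exact absurd h hs
    have hbr : ((s - 1) * 2 ^ m < (n : Int)) ∧ ((n : Int) ≤ s * 2 ^ m) :=
      (PySem.Int.neg_floordiv_neg_eq_iff_of_pos (a := (n : Int)) (b := 2 ^ m) (q := s) hk).mp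
        hceil.symm
    have hs0 : 0 ≤ s := by nlinarith [hbr.1, hbr.2, hk]
    have hspos : 0 < s := lt_of_le_of_ne hs0 (Ne.symm hs)
    rw [if_neg hs]
    -- A's loop as a flatMap over the chunk indices
    have hfun : (fun (acc : List Int) (i : Int) =>
          if PySem.Int.mod i 2 = 1 then
            acc ++ PySem.List.slice tag_list (some (s * i)) (some (s * (i + 1)))
          else acc) =
        (fun acc i => acc ++ (if PySem.Int.mod i 2 = 1 then
            PySem.List.slice tag_list (some (s * i)) (some (s * (i + 1))) else [])) := by
      funext acc i
      split <;> simp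
    rw [hfun, PySem.List.foldl_append_eq_flatMap, List.nil_append]
    rw [PySem.List.pyRange_one, List.flatMap_map]
    have hcast : ((2:Int) ^ m - 0).toNat = 2 ^ m := by
      have hpow : ((2:Int) ^ m) = ((2 ^ m : Nat) : Int) := by push_cast; ring
      rw [hpow]; omega
    rw [hcast]
    -- rewrite each chunk term into drop/take form
    have hterm : ∀ j : Nat,
        (if PySem.Int.mod ((0:Int) + (j:Int)) 2 = 1 then
            PySem.List.slice tag_list (some (s * ((0:Int) + j))) (some (s * ((0:Int) + j + 1))) else []) =
        (if j % 2 = 1 then (tag_list.drop (s.toNat * j)).take s.toNat else []) := by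
      intro j
      have hmod : PySem.Int.mod ((0:Int) + (j:Int)) 2 = ((j % 2 : Nat) : Int) := by
        rw [zero_add]; exact_mod_cast PySem.Int.mod_natCast j 2
      by_cases hj : j % 2 = 1
      · rw [if_pos hj, if_pos (by rw [hmod]; exact_mod_cast congrArg (Nat.cast : Nat → Int) hj)]
        have e1 : s * ((0:Int) + j) = ((s.toNat * j : Nat) : Int) := by
          push_cast; rw [Int.toNat_of_nonneg hs0]; ring
        have e2 : s * ((0:Int) + j + 1) = ((s.toNat * j : Nat) : Int) + ((s.toNat : Nat) : Int) := by
          push_cast; rw [Int.toNat_of_nonneg hs0]; ring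
        rw [e1, e2, PySem.List.slice_natCast_add]
      · have hne2 : ¬ PySem.Int.mod ((0:Int) + (j:Int)) 2 = 1 := by
          rw [hmod]
          intro hcontra
          exact hj (by exact_mod_cast hcontra)
        rw [if_neg hj, if_neg hne2]
    rw [List.flatMap_congr (fun j _ => hterm j)]
    have h2K : 2 ^ m = 2 * 2 ^ (m - 1) := by
      rw [← pow_succ']
      congr 1
      omega
    rw [h2K, flatMap_range_odd (2 ^ (m - 1)) (fun j => (tag_list.drop (s.toNat * j)).take s.toNat)]
    -- B's element filter equals the same flatMap of odd chunks
    have hσ : 0 < s.toNat := by omega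
    have hσcast : ((s.toNat : Nat) : Int) = s := Int.toNat_of_nonneg hs0
    have hlen : tag_list.length ≤ 2 * s.toNat * 2 ^ (m - 1) := by
      have h1 : (n : Int) ≤ s * 2 ^ m := hbr.2
      have hpm : ((2:Int) ^ m) = ((2 ^ m : Nat) : Int) := by push_cast; ring
      rw [← hσcast, hpm] at h1
      have hnat : n ≤ s.toNat * 2 ^ m := by exact_mod_cast h1
      have heq : 2 * s.toNat * 2 ^ (m - 1) = s.toNat * 2 ^ m := by rw [h2K]; ring
      omega
    have hB := filter_enum_chunks s.toNat hσ (2 ^ (m - 1)) tag_list 0 hlen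
    rw [hσcast] at hB
    simp only [Nat.mul_zero, Nat.cast_zero] at hB
    rw [hB]

-- ===== VERDICT =====
theorem get_from_list_spec : Claim_equal_get_from_list := by
  intro tag_list order _ hpre
  unfold Spec_get_from_list
  by_cases h0 : order = 0
  · subst h0; simp [get_from_list, get_from_list_alt]
  · exact main_eq tag_list order hpre h0
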